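-- pv_equiv track=rewrite | github.com/bluecher31/pixel-flipping | conditional_explainer/helper_kernelshap.py | _postprocess_coalitions
-- ===== SOURCE A (Python) =====
-- from typing import List, Set
--
-- def _postprocess_coalitions(list_coalitions: List[Set[int]], features: Set[int], type_cardinality: str) \
--         -> List[Set[int]]:
--     """Sort according to cardinality. Invert coalitions (complement wrt features) if necessary."""
--     if type_cardinality == 'negative':  # calculate complement w.r.t. all features
--         list_coalitions = [features.difference(S) for S in list_coalitions]
--     else:
--         pass
--
--     list_coalitions.sort(key=lambda s: len(s))
--     return list_coalitions
-- ===== SOURCE B (Python) =====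
-- from typing import List, Set
--
-- def _postprocess_coalitions(list_coalitions: List[Set[int]], features: Set[int], type_cardinality: str) \
--         -> List[Set[int]]:
--     """Bucket (counting) sort by cardinality instead of a comparison sort; complement first if requested."""
--     if type_cardinality == 'negative':  # calculate complement w.r.t. all features
--         list_coalitions = [features.difference(S) for S in list_coalitions]
--     buckets = {}
--     for s in list_coalitions:
--         buckets.setdefault(len(s), []).append(s)
--     out = []
--     for k in sorted(buckets):
--         out.extend(buckets[k])
--     list_coalitions[:] = out
--     return list_coalitions
-- ===== Notes on version B (the rewrite author's own statement) =====
-- stated objective: alternative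
-- what changed: Replaces the comparison sort by cardinality with a counting/bucket sort: one pass fills a dict of buckets keyed by len(s), then buckets are concatenated in ascending key order (stable by construction), written back in place so mutation behaviour matches A in both branches.
import Mathlib
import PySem

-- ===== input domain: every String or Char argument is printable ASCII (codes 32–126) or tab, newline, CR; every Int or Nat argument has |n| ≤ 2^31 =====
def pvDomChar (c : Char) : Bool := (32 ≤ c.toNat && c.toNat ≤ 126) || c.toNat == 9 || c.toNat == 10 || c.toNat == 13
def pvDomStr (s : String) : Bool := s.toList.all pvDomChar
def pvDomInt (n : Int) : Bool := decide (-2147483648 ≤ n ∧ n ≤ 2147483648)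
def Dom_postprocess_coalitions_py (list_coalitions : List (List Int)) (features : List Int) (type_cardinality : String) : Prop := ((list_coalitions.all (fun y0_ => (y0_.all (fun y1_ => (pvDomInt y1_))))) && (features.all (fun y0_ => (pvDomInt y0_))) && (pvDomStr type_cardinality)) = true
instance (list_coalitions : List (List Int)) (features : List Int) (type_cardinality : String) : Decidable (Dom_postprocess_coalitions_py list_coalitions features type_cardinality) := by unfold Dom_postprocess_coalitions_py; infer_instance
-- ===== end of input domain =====

-- B replaces A's comparison sort by cardinality with a bucket sort (group by length, concatenate buckets in ascending key order); same return value and same in-place effect, no speed claim.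


-- ===== PORT A =====
def postprocess_coalitions_py (list_coalitions : List (List Int)) (features : List Int) (type_cardinality : String) : List (List Int) :=
  let lc := if type_cardinality == "negative"
    then list_coalitions.map (fun S => PySem.Set.diff features S)
    else list_coalitions
  PySem.List.sorted lc (fun s => s.length) false

-- ===== PORT B =====
-- B: counting/bucket sort — group by length into a dict, then concatenate buckets by ascending key
def postprocess_coalitions_py_alt (list_coalitions : List (List Int)) (features : List Int) (type_cardinality : String) : List (List Int) :=
  let lc := if type_cardinality == "negative"
    then list_coalitions.map (fun S => PySem.Set.diff features S)
    else list_coalitions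
  let buckets : PySem.Dict Nat (List (List Int)) :=
    lc.foldl (fun d s => d.modify s.length [] (fun v => v ++ [s])) PySem.Dict.empty
  let ks := PySem.List.sorted buckets.keys (fun k => k) false
  ks.foldl (fun out k => out ++ buckets.getD k []) []

-- ===== PRECONDITION & SPEC =====
def Spec_postprocess_coalitions_py (list_coalitions : List (List Int)) (features : List Int) (type_cardinality : String) (out : List (List Int)) : Prop := out = postprocess_coalitions_py_alt list_coalitions features type_cardinality
instance (list_coalitions : List (List Int)) (features : List Int) (type_cardinality : String) (out : List (List Int)) : Decidable (Spec_postprocess_coalitions_py list_coalitions features type_cardinality out) := by unfold Spec_postprocess_coalitions_py; infer_instance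

-- ===== CLAIM (what is proved, stated in full; the proofs are below) =====
def Claim_equal_postprocess_coalitions_py : Prop := ∀ (list_coalitions : List (List Int)) (features : List Int) (type_cardinality : String), Dom_postprocess_coalitions_py list_coalitions features type_cardinality → Spec_postprocess_coalitions_py list_coalitions features type_cardinality (postprocess_coalitions_py list_coalitions features type_cardinality)

-- ===== LEMMAS AND PROOFS =====

theorem insertBy_split_key {α : Type} (key : α → Nat) (x : α) (A B : List α)
    (hA : ∀ a ∈ A, ¬ key x < key a) (hB : ∀ b ∈ B, key x < key b) :
    PySem.List.insertBy (fun a b => decide (key a < key b)) x (A ++ B) = A ++ x :: B := by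
  induction A with
  | nil =>
    cases B with
    | nil => simp [PySem.List.insertBy]
    | cons b bs => simp [PySem.List.insertBy, hB b (by simp)]
  | cons a as ih =>
    have h1 : ¬ key x < key a := hA a (by simp)
    simp only [List.cons_append, PySem.List.insertBy, h1, decide_false]
    simp [ih (fun a ha => hA a (by simp [ha]))]

theorem pairwise_lt_three_split (M : List Nat) (c : Nat) (h : M.Pairwise (· < ·)) :
    M = M.filter (fun k => decide (k < c)) ++ M.filter (fun k => k == c)
        ++ M.filter (fun k => decide (c < k)) := by
  induction M with
  | nil => simp
  | cons m t ih =>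
    have ht := (List.pairwise_cons.mp h).1
    have hp := (List.pairwise_cons.mp h).2
    rcases Nat.lt_trichotomy m c with hm | hm | hm
    · simp only [List.filter_cons, hm, decide_true]
      have : (m == c) = false := by simp [Nat.ne_of_lt hm]
      simp [this, Nat.not_lt.mpr (Nat.le_of_lt hm), ← ih hp]
    · subst hm
      have h1 : t.filter (fun k => decide (k < m)) = [] := by
        rw [List.filter_eq_nil_iff]; intro k hk; simp [Nat.not_lt.mpr (Nat.le_of_lt (ht k hk))]
      have h2 : t.filter (fun k => k == m) = [] := by
        rw [List.filter_eq_nil_iff]; intro k hk; simp [Nat.ne_of_gt (ht k hk)]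
      have h3 : t.filter (fun k => decide (m < k)) = t := by
        rw [List.filter_eq_self]; intro k hk; simp [ht k hk]
      simp [h1, h2, h3]
    · have h1 : t.filter (fun k => decide (k < c)) = [] := by
        rw [List.filter_eq_nil_iff]; intro k hk
        simp [Nat.not_lt.mpr (Nat.le_of_lt (Nat.lt_trans hm (ht k hk)))]
      have h2 : t.filter (fun k => k == c) = [] := by
        rw [List.filter_eq_nil_iff]; intro k hk
        simp [Nat.ne_of_gt (Nat.lt_trans hm (ht k hk))]
      have h3 : t.filter (fun k => decide (c < k)) = t := by
        rw [List.filter_eq_self]; intro k hk; simp [Nat.lt_trans hm (ht k hk)]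
      have : (m == c) = false := by simp [Nat.ne_of_gt hm]
      simp [h1, h2, h3, Nat.not_lt.mpr (Nat.le_of_lt hm), hm, this]

theorem ofList_append_singleton {α : Type} [BEq α] (l : List α) (a : α) :
    PySem.Set.ofList (l ++ [a]) = PySem.Set.add (PySem.Set.ofList l) a := by
  rw [PySem.Set.ofList_eq_foldl, List.foldl_append, ← PySem.Set.ofList_eq_foldl]
  rfl

theorem flatMap_congr_mem {α β : Type} (N : List α) (f g : α → List β)
    (h : ∀ k ∈ N, f k = g k) : N.flatMap f = N.flatMap g := by
  simp only [List.flatMap]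
  rw [List.map_congr_left h]

theorem sorted_eq_buckets {α : Type} (key : α → Nat) (xs : List α) :
    PySem.List.sorted xs key false =
      (PySem.List.sorted (PySem.Set.ofList (xs.map key)) (fun k => k) false).flatMap
        (fun k => xs.filter (fun s => key s == k)) := by
  induction xs using List.reverseRecOn with
  | nil => rfl
  | append_singleton ys x ih =>
    set kx := key x with hkx
    set K : PySem.Set Nat := PySem.Set.ofList (ys.map key) with hK
    set sk := PySem.List.sorted K (fun k => k) false with hsk
    set f : Nat → List α := fun k => ys.filter (fun s => key s == k) with hf
    set f' : Nat → List α := fun k => (ys ++ [x]).filter (fun s => key s == k) with hf'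
    have hpw : sk.Pairwise (· < ·) := PySem.List.sorted_ofList_pairwise_lt (ys.map key)
    set L := sk.filter (fun k => decide (k < kx)) with hL
    set M0 := sk.filter (fun k => k == kx) with hM0
    set H := sk.filter (fun k => decide (kx < k)) with hH
    have hsplit : sk = L ++ M0 ++ H := pairwise_lt_three_split sk kx hpw
    -- left side: one more insertion into sorted ys
    have hLHS : PySem.List.sorted (ys ++ [x]) key false
        = L.flatMap f ++ M0.flatMap f ++ (x :: H.flatMap f) := by
      rw [PySem.List.sorted_eq_foldl_insertBy, List.foldl_append,
        ← PySem.List.sorted_eq_foldl_insertBy, ih]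
      rw [hsplit]
      simp only [List.flatMap_append, List.foldl_cons, List.foldl_nil]
      rw [← List.flatMap_append]
      rw [insertBy_split_key key x ((L ++ M0).flatMap f) (H.flatMap f)]
      · intro a ha
        rcases List.mem_flatMap.mp ha with ⟨k, hk, hak⟩
        have hkey : key a = k := by
          have := (List.mem_filter.mp hak).2; simpa using this
        rcases List.mem_append.mp hk with hkL | hkM
        · have : k < kx := by simpa using (List.mem_filter.mp hkL).2
          omega
        · have : k = kx := by simpa using (List.mem_filter.mp hkM).2
          omega
      · intro b hb
        rcases List.mem_flatMap.mp hb with ⟨k, hk, hbk⟩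
        have hkey : key b = k := by
          have := (List.mem_filter.mp hbk).2; simpa using this
        have : kx < k := by simpa using (List.mem_filter.mp hk).2
        omega
    rw [hLHS]
    -- the new key list
    have hmap : (ys ++ [x]).map key = ys.map key ++ [kx] := by simp [hkx]
    rw [hmap, ofList_append_singleton]
    have hf2 : ∀ k, f' k = f k ++ (if kx == k then [x] else []) := by
      intro k
      simp only [hf', hf, List.filter_append, List.filter_cons, List.filter_nil]
      rw [hkx]
    have hfL : ∀ k ∈ L, f' k = f k := by
      intro k hk
      have hlt : k < kx := by simpa using (List.mem_filter.mp hk).2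
      rw [hf2 k]; have : (kx == k) = false := by simp; omega
      simp [this]
    have hfH : ∀ k ∈ H, f' k = f k := by
      intro k hk
      have hlt : kx < k := by simpa using (List.mem_filter.mp hk).2
      rw [hf2 k]; have : (kx == k) = false := by simp; omega
      simp [this]
    by_cases hc : kx ∈ K
    · -- key already present: same key list, x joins the end of its bucket
      have hadd : PySem.Set.add K kx = K := by
        simp [PySem.Set.add, PySem.Set.contains, hc]
      rw [hadd, ← hsk, hsplit]
      have hkxsk : kx ∈ sk := by
        rw [hsk]; exact (PySem.List.mem_sorted _ _ _ _).mpr hc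
      have hnd : sk.Nodup := hpw.imp (fun h => Nat.ne_of_lt h)
      have hM0eq : M0 = [kx] := by
        rw [hM0, List.filter_beq, List.count_eq_one_of_mem hnd hkxsk]
        rfl
      rw [hM0eq]
      simp only [List.flatMap_append, List.flatMap_cons, List.flatMap_nil]
      rw [flatMap_congr_mem L f' f hfL, flatMap_congr_mem H f' f hfH, hf2 kx]
      simp
    · -- fresh key: it is spliced into the key list between L and H, bucket = [x]
      have hadd : PySem.Set.add K kx = K ++ [kx] := by
        simp [PySem.Set.add, PySem.Set.contains, hc]
      rw [hadd]
      have hkxsk : kx ∉ sk := by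
        rw [hsk]; intro h; exact hc ((PySem.List.mem_sorted _ _ _ _).mp h)
      have hM0nil : M0 = [] := by
        rw [hM0, List.filter_eq_nil_iff]; intro k hk; simp
        intro h; subst h; exact hkxsk hk
      have hskLH : sk = L ++ H := by rw [hsplit, hM0nil]; simp
      have hLlt : ∀ a ∈ L, a < kx := by
        intro a ha; simpa using (List.mem_filter.mp ha).2
      have hHgt : ∀ b ∈ H, kx < b := by
        intro b hb; simpa using (List.mem_filter.mp hb).2
      have hLsub : L.Pairwise (fun a b => a < b) := by
        refine List.Pairwise.sublist ?_ hpw; rw [hL]; exact List.filter_sublist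
      have hHsub : H.Pairwise (fun a b => a < b) := by
        refine List.Pairwise.sublist ?_ hpw; rw [hH]; exact List.filter_sublist
      have hperm : (L ++ kx :: H).Perm (K ++ [kx]) := by
        refine List.perm_middle.trans ?_
        refine (List.Perm.cons kx ?_).trans (List.perm_append_singleton kx K).symm
        rw [← hskLH, hsk]
        exact PySem.List.sorted_perm _ _ _
      have hsorted' : PySem.List.sorted (K ++ [kx]) (fun k => k) false = L ++ kx :: H := by
        apply PySem.List.sorted_eq_of_perm_of_pairwise_lt _ _ _ hperm
        rw [List.pairwise_append]
        refine ⟨hLsub, ?_, ?_⟩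
        · rw [List.pairwise_cons]
          exact ⟨hHgt, hHsub⟩
        · intro a ha b hb
          rcases List.mem_cons.mp hb with rfl | hbH
          · exact hLlt a ha
          · exact Nat.lt_trans (hLlt a ha) (hHgt b hbH)
      rw [hsorted']
      have hfkx : f kx = [] := by
        rw [hf, List.filter_eq_nil_iff]; intro s hs
        simp only [beq_iff_eq]
        intro h
        exact hc ((PySem.Set.mem_ofList _ _).mpr (h ▸ List.mem_map_of_mem hs))
      simp only [List.flatMap_append, List.flatMap_cons, hM0nil, List.flatMap_nil]
      rw [flatMap_congr_mem L f' f hfL, flatMap_congr_mem H f' f hfH, hf2 kx, hfkx]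
      simp

theorem alt_pipeline_eq (lc : List (List Int)) :
    (PySem.List.sorted (lc.foldl (fun d s => d.modify s.length [] (fun v => v ++ [s])) (PySem.Dict.empty : PySem.Dict Nat (List (List Int)))).keys (fun k => k) false).foldl
        (fun out k => out ++ (lc.foldl (fun d s => d.modify s.length [] (fun v => v ++ [s])) (PySem.Dict.empty : PySem.Dict Nat (List (List Int)))).getD k []) []
      = (PySem.List.sorted (PySem.Set.ofList (lc.map (fun s => s.length))) (fun k => k) false).flatMap
          (fun k => lc.filter (fun s => s.length == k)) := by
  have h1 : lc.foldl (fun d s => d.modify s.length [] (fun v => v ++ [s])) (PySem.Dict.empty : PySem.Dict Nat (List (List Int)))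
      = (lc.map (fun s => (s.length, s))).foldl (fun d p => d.modify p.1 [] (fun v => v ++ [p.2])) PySem.Dict.empty := by
    rw [List.foldl_map]
  have hgetD : ∀ k, (lc.foldl (fun d s => d.modify s.length [] (fun v => v ++ [s])) (PySem.Dict.empty : PySem.Dict Nat (List (List Int)))).getD k [] = lc.filter (fun s => s.length == k) := by
    intro k
    rw [h1, PySem.Dict.getD_foldl_modify_append]
    rw [List.filter_map]
    simp [Function.comp_def]
  have hkeys : (lc.foldl (fun d s => d.modify s.length [] (fun v => v ++ [s])) (PySem.Dict.empty : PySem.Dict Nat (List (List Int)))).keys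
      = PySem.Set.ofList (lc.map (fun s => s.length)) := by
    rw [PySem.Dict.keys_foldl_modify_key lc (fun s => s.length) [] (fun _ s => (fun v => v ++ [s])) PySem.Dict.empty]
    rw [PySem.Set.ofList_eq_foldl]
    rfl
  rw [hkeys, PySem.List.foldl_append_eq_flatMap]
  rw [List.nil_append]
  exact flatMap_congr_mem _ _ _ (fun k _ => hgetD k)

-- ===== VERDICT (by name: the statement is the Claim_ definition above) =====
theorem postprocess_coalitions_py_spec : Claim_equal_postprocess_coalitions_py := by
  intro lc features tc _
  unfold Spec_postprocess_coalitions_py postprocess_coalitions_py postprocess_coalitions_py_alt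
  rw [alt_pipeline_eq, sorted_eq_buckets]
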